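-- pv_equiv track=rewrite | github.com/ivanpeng/advent-of-code | day_9_1.py | remove_exclamation_points
-- ===== SOURCE A (Python) =====
-- def remove_exclamation_points(input):
--     new_str_arr = []
--     was_previous_char_exlamation = False
--     for char in input:
--         if char == "!":
--             was_previous_char_exlamation = True
--             continue
--         elif was_previous_char_exlamation:
--             was_previous_char_exlamation = False
--             continue
--         new_str_arr.append(char)
--     new_str = "".join(new_str_arr)
--     return new_str
-- ===== SOURCE B (Python) =====
-- import re
--
-- def remove_exclamation_points(input):
--     return re.sub(r'!+.?', '', input, flags=re.DOTALL)
-- ===== Notes on version B (the rewrite author's own statement) =====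
-- stated objective: idiomatic
-- what changed: Replaced the explicit index loop that threads a boolean previous-char-was-bang flag by a single regex substitution (pattern bang-run plus optional any char, DOTALL) that deletes each maximal run of exclamation points together with the one following character.
import Mathlib
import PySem

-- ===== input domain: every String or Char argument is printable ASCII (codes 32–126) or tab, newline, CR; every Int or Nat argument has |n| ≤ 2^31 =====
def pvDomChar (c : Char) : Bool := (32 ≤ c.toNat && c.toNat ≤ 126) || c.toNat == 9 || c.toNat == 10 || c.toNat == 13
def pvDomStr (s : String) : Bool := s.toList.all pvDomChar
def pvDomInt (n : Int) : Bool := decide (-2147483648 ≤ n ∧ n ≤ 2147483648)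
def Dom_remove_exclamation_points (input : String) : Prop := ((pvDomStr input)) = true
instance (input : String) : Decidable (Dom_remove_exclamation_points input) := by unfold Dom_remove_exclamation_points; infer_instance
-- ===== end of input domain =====

-- B replaces A's scan-with-flag loop by a single regex substitution re.sub(r'!+.?','') (more idiomatic); return values proved equal on all strings.


-- ===== PORT A =====
-- the for-loop with state (new_str_arr, was_previous_char_exlamation)
def pvAFold : List Char → List Char → Bool → List Char
  | [], acc, _ => acc
  | c :: rest, acc, flag =>
    if c = '!' then pvAFold rest acc true
    else if flag then pvAFold rest acc false
    else pvAFold rest (acc ++ [c]) false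

def remove_exclamation_points (input : String) : String :=
  String.mk (pvAFold input.toList [] false)

-- ===== PORT B =====
-- hand port of re.sub(r'!+.?','',input,flags=re.DOTALL): copy chars until a '!',
-- then skip the maximal run of '!' plus at most one following character ('.?' with DOTALL).
mutual
  def pvSub : List Char → List Char
    | [] => []
    | c :: rest => if c = '!' then pvEatBangs rest else c :: pvSub rest
  def pvEatBangs : List Char → List Char
    | [] => []
    | c :: rest => if c = '!' then pvEatBangs rest else pvSub rest
end

def remove_exclamation_points_alt (input : String) : String :=
  String.mk (pvSub input.toList)

-- ===== PRECONDITION & SPEC =====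
def Spec_remove_exclamation_points (input : String) (out : String) : Prop := out = remove_exclamation_points_alt input
instance (input : String) (out : String) : Decidable (Spec_remove_exclamation_points input out) := by unfold Spec_remove_exclamation_points; infer_instance

-- ===== CLAIM (what is proved, stated in full; the proofs are below) =====
def Claim_equal_remove_exclamation_points : Prop := ∀ (input : String), Dom_remove_exclamation_points input → Spec_remove_exclamation_points input (remove_exclamation_points input)

-- ===== LEMMAS AND PROOFS =====
theorem pvAFold_eq (l : List Char) :
    (∀ acc, pvAFold l acc false = acc ++ pvSub l) ∧
    (∀ acc, pvAFold l acc true = acc ++ pvEatBangs l) := by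
  induction l with
  | nil => simp [pvAFold, pvSub, pvEatBangs]
  | cons c rest ih =>
    constructor <;> intro acc <;> by_cases h : c = '!' <;>
      simp [pvAFold, pvSub, pvEatBangs, h, ih.1, ih.2]

-- ===== VERDICT (by name: the statement is the Claim_ definition above) =====
theorem remove_exclamation_points_spec : Claim_equal_remove_exclamation_points := by
  intro input _
  unfold Spec_remove_exclamation_points remove_exclamation_points remove_exclamation_points_alt
  rw [(pvAFold_eq input.toList).1 []]
  simp
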